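-- pv_equiv track=rewrite | github.com/fraluc06/Esercizi-python | Ex Esami/Eserciziario/17 fatto/program.py | es17
-- ===== SOURCE A (Python) =====
-- def es17(ls, k):
--     '''
--     Es 7: 6 punti
--     progettare la funzione es17(ls,k) che:
--     - riceve  in input una lista di parole ls ed un intero k
--     - cancella da ls le parole che contengono almeno k  caratteri uguali (sia in maiuscolo che in minuscolo)
--     - restituisce il numero di parole cancellate da ls.
--     Nota che al termine della funzione la lista passata come parametro deve risultare modificata
--     (ricorda che le liste sono mutabili).
--      ESEMPI:
--      Se ls=[ 'ananas', 'pera', 'banana', 'melone', 'kiwi','albicocca'] e k=3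
--      la funzione restituisce 3 e la lista ls diventa ['pera', 'melone', 'kiwi']
--      Se ls=[ 'Angelo', 'Andrea', 'Osvaldo', 'Anna', 'Monica', 'Adele'] e k=2
--      la funzione restituisce 4 e la lista ls diventa ['Angelo', 'Monica']
--     '''
--     canc=0
--     app_ls = ls.copy()
--     for s in app_ls:
--         s_low = s.lower()
--         for c in range(0,len(s_low)):
--              if (s_low.count(s_low[c])>=k):
--                  canc+=1
--                  ls.remove (s)
--                  break
--
--     return canc
-- ===== SOURCE B (Python) =====
-- def _bad(w, k):
--     # True iff some character (case-insensitive) occurs at least k times in w: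
--     # sort the lowercased characters and look for a run of k equal ones.
--     run = 0
--     prev = ''
--     for c in sorted(w.lower()):
--         run = run + 1 if c == prev else 1
--         prev = c
--         if run >= k:
--             return True
--     return False
--
--
-- def es17(ls, k):
--     removed = 0
--     kept = []
--     for w in ls:
--         if _bad(w, k):
--             removed += 1
--         else:
--             kept.append(w)
--     ls[:] = kept
--     return removed
-- ===== Notes on version B (the rewrite author's own statement) =====
-- stated objective: alternative
-- what changed: Per word, the repeated s.count scan at every character position is replaced by sorting the lowercased characters once and scanning for a run of >= k equal characters, and the outer loop becomes a single-pass filter with a counter instead of remove() calls on the list.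
import Mathlib
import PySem

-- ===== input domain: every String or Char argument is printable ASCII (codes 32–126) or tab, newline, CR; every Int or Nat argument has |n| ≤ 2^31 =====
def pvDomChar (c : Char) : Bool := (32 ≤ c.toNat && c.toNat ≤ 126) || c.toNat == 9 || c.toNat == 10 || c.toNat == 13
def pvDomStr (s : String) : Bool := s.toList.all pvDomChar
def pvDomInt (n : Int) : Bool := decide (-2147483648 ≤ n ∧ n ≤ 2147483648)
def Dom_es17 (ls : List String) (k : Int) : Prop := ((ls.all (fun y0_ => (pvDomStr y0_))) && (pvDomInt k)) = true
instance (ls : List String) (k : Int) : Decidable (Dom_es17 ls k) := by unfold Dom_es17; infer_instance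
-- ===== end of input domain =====

-- B sorts each lowercased word once and looks for a run of ≥ k equal characters instead of
-- calling .count at every character position; equivalence is about the RETURN value (both
-- Pythons also mutate ls to the same surviving list, not modelled here).

-- ===== PORT A =====
-- inner loop: 'for c in range(0, len(s_low)): if s_low.count(s_low[c]) >= k: ... break'
def es17A_inner (s_low : String) (k : Int) : Bool :=
  (PySem.List.pyRange 0 (PySem.Str.len s_low) 1).any (fun c =>
    match PySem.Str.pyGet? s_low c with
    | some ch => decide ((PySem.Str.count s_low (String.ofList [ch]) : Int) ≥ k)
    | none => false)

-- A's ls.remove(s) mutation does not affect the returned count (canc only depends on the copy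
-- app_ls), so the port carries just canc.
def es17 (ls : List String) (k : Int) : Int :=
  ls.foldl (fun canc s =>
    if es17A_inner (PySem.Str.lower s) k then canc + 1 else canc) 0

-- ===== PORT B =====
-- Source B: run/prev scan over the sorted lowercased characters, early-returning at a run of k
def es17B_scan (k : Int) : List Char → Option Char → Int → Bool
  | [], _, _ => false
  | c :: cs, prev, run =>
    let run' := if some c == prev then run + 1 else 1
    if run' ≥ k then true else es17B_scan k cs (some c) run'

def es17B_bad (w : String) (k : Int) : Bool :=
  es17B_scan k (PySem.List.sorted (PySem.Str.lower w).toList (fun x => x) false) none 0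

def es17_alt (ls : List String) (k : Int) : Int :=
  (ls.foldl (fun st w =>
      if es17B_bad w k then (st.1 + 1, st.2) else (st.1, st.2 ++ [w]))
    ((0 : Int), ([] : List String))).1

-- ===== PRECONDITION & SPEC =====
def Spec_es17 (ls : List String) (k : Int) (out : Int) : Prop := out = es17_alt ls k
instance (ls : List String) (k : Int) (out : Int) : Decidable (Spec_es17 ls k out) := by unfold Spec_es17; infer_instance

-- ===== CLAIM (what is proved, stated in full; the proofs are below) =====
def Claim_equal_es17 : Prop := ∀ (ls : List String) (k : Int), Dom_es17 ls k → Spec_es17 ls k (es17 ls k)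

-- ===== LEMMAS AND PROOFS =====

-- str.count of a single-character needle is List.count
theorem chars_count_go_singleton (c : Char) :
    ∀ (fuel : Nat) (l : List Char) (acc : Nat), l.length ≤ fuel →
      PySem.Chars.count.go [c] fuel l acc = acc + l.count c := by
  intro fuel
  induction fuel with
  | zero => intro l acc h; interval_cases hl : l.length; simp_all [PySem.Chars.count.go, List.length_eq_zero_iff]
  | succ n ih =>
    intro l acc h
    cases l with
    | nil => simp [PySem.Chars.count.go]
    | cons x t =>
      by_cases hx : c = x
      · subst hx
        simp only [PySem.Chars.count.go, List.isPrefixOf, Bool.and_true,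
          beq_self_eq_true, if_true, List.length_cons] at *
        simp only [List.length_nil, Nat.zero_add, List.drop_succ_cons, List.drop_zero]
        rw [ih t (acc + 1) (by omega)]
        simp
        omega
      · have hbeq : ([c].isPrefixOf (x :: t)) = false := by
          simp [List.isPrefixOf]
          exact fun h' => hx (by simpa using h')
        simp only [PySem.Chars.count.go, hbeq, List.length_cons] at *
        rw [ih t acc (by omega)]
        simp [List.count_cons]
        intro h'
        exact absurd h'.symm hx

theorem chars_count_singleton (s : List Char) (c : Char) :
    PySem.Chars.count s [c] = s.count c := by
  have h0 : PySem.Chars.count s [c] = PySem.Chars.count.go [c] s.length s 0 := rfl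
  rw [h0, chars_count_go_singleton c s.length s 0 (le_refl _)]
  omega

-- A's inner loop is 'some character of s_low occurs ≥ k times'
theorem es17A_inner_iff (cs : List Char) (k : Int) :
    es17A_inner (String.ofList cs) k = true ↔ ∃ c ∈ cs, ((cs.count c : Int) ≥ k) := by
  unfold es17A_inner
  simp only [PySem.Str.len_eq, String.toList_ofList, PySem.Str.pyGet?_eq,
    PySem.Chars.pyGet?_eq_listPyGet?]
  rw [PySem.List.pyRange_one]
  simp only [Int.sub_zero, Int.toNat_natCast, List.any_map, List.any_eq_true]
  constructor
  · rintro ⟨i, hi, hP⟩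
    simp only [List.mem_range] at hi
    simp only [Function.comp, Int.zero_add] at hP
    rw [PySem.List.pyGet?_natCast] at hP
    rw [List.getElem?_eq_getElem hi] at hP
    refine ⟨cs[i], List.getElem_mem hi, ?_⟩
    simp only [PySem.Str.count_eq, String.toList_ofList, chars_count_singleton] at hP
    simpa using hP
  · rintro ⟨c, hc, hk⟩
    obtain ⟨i, hi, rfl⟩ := List.mem_iff_getElem.mp hc
    refine ⟨i, by simpa using hi, ?_⟩
    simp only [Function.comp, Int.zero_add]
    rw [PySem.List.pyGet?_natCast, List.getElem?_eq_getElem hi]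
    simp only [PySem.Str.count_eq, String.toList_ofList, chars_count_singleton]
    simpa using hk

-- B's scan invariant on a sorted tail
theorem es17B_scan_iff (k : Int) :
    ∀ (l : List Char), l.Pairwise (· ≤ ·) → ∀ (p : Char) (r : Int),
      (∀ c ∈ l, p ≤ c) →
      (es17B_scan k l (some p) r = true ↔
        ∃ c ∈ l, ((if c = p then r else 0) + (l.count c : Int) ≥ k)) := by
  intro l
  induction l with
  | nil => intro _ p r _; simp [es17B_scan]
  | cons c cs ih =>
    intro hsorted p r hle
    have hsorted' : cs.Pairwise (· ≤ ·) := hsorted.of_cons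
    have hcle : ∀ d ∈ cs, c ≤ d := (List.pairwise_cons.mp hsorted).1
    have hpc : p ≤ c := hle c List.mem_cons_self
    have hne : ∀ d ∈ cs, d ≠ c → d ≠ p := by
      intro d hd hdc hdp
      have h1 : c ≤ p := hdp ▸ hcle d hd
      exact hdc (hdp.trans (le_antisymm h1 hpc).symm)
    set r' : Int := if some c == some p then r + 1 else 1 with hr'
    have hstep : es17B_scan k (c :: cs) (some p) r =
        if r' ≥ k then true else es17B_scan k cs (some c) r' := rfl
    have hkey : r' + (cs.count c : Int) = (if c = p then r else 0) + ((c :: cs).count c : Int) := by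
      rw [List.count_cons_self]
      by_cases h : c = p <;> simp [hr', h] <;> omega
    rw [hstep]
    by_cases hbr : r' ≥ k
    · simp only [hbr, if_true, true_iff]
      refine ⟨c, List.mem_cons_self, ?_⟩
      rw [← hkey]
      have : (0:Int) ≤ (cs.count c : Int) := Int.natCast_nonneg _
      omega
    · simp only [hbr, if_false]
      rw [ih hsorted' c r' hcle]
      constructor
      · rintro ⟨d, hd, hdk⟩
        by_cases hdc : d = c
        · subst hdc
          rw [if_pos rfl] at hdk
          exact ⟨d, List.mem_cons_self, by rw [← hkey]; exact hdk⟩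
        · refine ⟨d, List.mem_cons_of_mem _ hd, ?_⟩
          rw [List.count_cons_of_ne (fun h => hdc h.symm)]
          simp only [hdc, if_false] at hdk
          simp only [hne d hd hdc, if_false]
          exact hdk
      · rintro ⟨d, hd, hdk⟩
        rcases List.mem_cons.mp hd with hdc | hdcs
        · subst hdc
          rw [← hkey] at hdk
          have hpos : 0 < cs.count d := by
            by_contra hz
            push Not at hz
            have h0 : cs.count d = 0 := Nat.le_zero.mp hz
            rw [h0] at hdk
            simp at hdk
            omega
          exact ⟨d, List.count_pos_iff.mp hpos, by rw [if_pos rfl]; exact hdk⟩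
        · by_cases hdc : d = c
          · subst hdc
            refine ⟨d, hdcs, ?_⟩
            rw [← hkey] at hdk
            rw [if_pos rfl]
            exact hdk
          · refine ⟨d, hdcs, ?_⟩
            simp only [hne d hdcs hdc, if_false] at hdk
            simp only [hdc, if_false]
            rw [List.count_cons_of_ne (fun h => hdc h.symm)] at hdk
            exact hdk

-- B's per-word check is 'some character occurs ≥ k times' too
theorem es17B_scan_sorted_iff (k : Int) (cs l : List Char) (hperm : l.Perm cs)
    (hsorted : l.Pairwise (· ≤ ·)) :
    es17B_scan k l none 0 = true ↔ ∃ c ∈ cs, ((cs.count c : Int) ≥ k) := by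
  have hcount : ∀ c, l.count c = cs.count c := fun c => hperm.count_eq c
  have hmem : ∀ c, c ∈ l ↔ c ∈ cs := fun c => hperm.mem_iff
  cases l with
  | nil =>
    refine ⟨fun h => by simp [es17B_scan] at h, ?_⟩
    rintro ⟨c, hc, _⟩
    rw [← hmem c] at hc
    simp at hc
  | cons c t =>
    have hinit : es17B_scan k (c :: t) none 0 = es17B_scan k (c :: t) (some c) 0 := by
      simp [es17B_scan]
    rw [hinit, es17B_scan_iff k (c :: t) hsorted c 0
      (by intro d hd
          rcases List.mem_cons.mp hd with rfl | hdt
          · exact le_refl _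
          · exact (List.pairwise_cons.mp hsorted).1 d hdt)]
    constructor
    · rintro ⟨d, hd, hdk⟩
      refine ⟨d, (hmem d).mp hd, ?_⟩
      rw [← hcount d]
      split_ifs at hdk <;> omega
    · rintro ⟨d, hd, hdk⟩
      refine ⟨d, (hmem d).mpr hd, ?_⟩
      rw [hcount d]
      split_ifs <;> omega

theorem es17B_bad_iff (w : String) (k : Int) :
    es17B_bad w k = true ↔
      ∃ c ∈ (PySem.Str.lower w).toList, (((PySem.Str.lower w).toList.count c : Int) ≥ k) := by
  unfold es17B_bad
  exact es17B_scan_sorted_iff k _ _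
    (PySem.List.sorted_perm (PySem.Str.lower w).toList (fun x => x) false)
    (PySem.List.sorted_pairwise (PySem.Str.lower w).toList (fun x => x))

-- the two per-word checks agree
theorem bad_eq (s : String) (k : Int) :
    es17A_inner (PySem.Str.lower s) k = es17B_bad s k := by
  rw [Bool.eq_iff_iff]
  have h1 : es17A_inner (PySem.Str.lower s) k
      = es17A_inner (String.ofList (PySem.Str.lower s).toList) k := by
    rw [String.ofList_toList]
  rw [h1, es17A_inner_iff, es17B_bad_iff]

-- ===== VERDICT (by name: the statement is the Claim_ definition above) =====
theorem es17_spec : Claim_equal_es17 := by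
  intro ls k _
  unfold Spec_es17 es17 es17_alt
  have hsplit : (fun (st : Int × List String) w =>
      if es17B_bad w k then (st.1 + 1, st.2) else (st.1, st.2 ++ [w])) =
      (fun (st : Int × List String) w =>
        ((if es17B_bad w k then st.1 + 1 else st.1),
         (if es17B_bad w k then st.2 else st.2 ++ [w]))) := by
    funext st w
    by_cases h : es17B_bad w k <;> simp [h]
  rw [hsplit]
  rw [PySem.List.foldl_prod_mk
    (f := fun (a : Int) w => if es17B_bad w k then a + 1 else a)
    (g := fun (b : List String) w => if es17B_bad w k then b else b ++ [w])]
  simp only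
  apply PySem.List.foldl_congr_mem
  intro acc s _
  rw [bad_eq s k]
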